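-- pv_equiv track=rewrite | github.com/motasem-obeidat/Do-LLMs-Surpass-Encoders-for-Biomedical-NER | decoders/src/metrics.py | entity_size
-- ===== SOURCE A (Python) =====
-- def entity_size(all_lbls, all_preds):
--     """
--     Categorizes entities based on their lengths from true and predicted labels.
--
--     Args:
--         all_lbls (list): A list of sentences, where each sentence is a list of true labels.
--         all_preds (list): A list of sentences, where each sentence is a list of predicted labels.
--
--     Returns:
--         tuple: A tuple containing two lists:
--             - true_entities_counts (list): A list containing three lists of true entities categorized by their lengths:
--                 - true_entity1: Entities of length 1.
--                 - true_entity2: Entities of length 2.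
--                 - true_entity3_plus: Entities of length 3 or more.
--
--             - pred_entities_counts (list): A list containing three lists of predicted entities categorized by their lengths:
--                 - pred_entity1: Entities of length 1.
--                 - pred_entity2: Entities of length 2.
--                 - pred_entity3_plus: Entities of length 3 or more.
--     """
--
--     true_entity1, true_entity2, true_entity3_plus = [], [], []
--     pred_entity1, pred_entity2, pred_entity3_plus = [], [], []
--
--     for sentence_true, sentence_pred in zip(all_lbls, all_preds):
--         tmp_true, tmp_pred = [], []
--         count = 0
--
--         for true_label, pred_label in zip(sentence_true, sentence_pred):
--             if true_label.startswith("B-"):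
--                 if count > 0:
--                     if count == 1:
--                         true_entity1.append(tmp_true)
--                         pred_entity1.append(tmp_pred)
--                     elif count == 2:
--                         true_entity2.append(tmp_true)
--                         pred_entity2.append(tmp_pred)
--                     else:
--                         true_entity3_plus.append(tmp_true)
--                         pred_entity3_plus.append(tmp_pred)
--
--                 tmp_true, tmp_pred = [true_label], [pred_label]
--                 count = 1
--
--             elif true_label.startswith("I-"):
--                 tmp_true.append(true_label)
--                 tmp_pred.append(pred_label)
--                 count += 1
--
--             elif true_label.startswith("O"):
--                 if count > 0:
--                     if count == 1:
--                         true_entity1.append(tmp_true)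
--                         pred_entity1.append(tmp_pred)
--                     elif count == 2:
--                         true_entity2.append(tmp_true)
--                         pred_entity2.append(tmp_pred)
--                     else:
--                         true_entity3_plus.append(tmp_true)
--                         pred_entity3_plus.append(tmp_pred)
--
--                 tmp_true, tmp_pred = [], []
--                 count = 0
--                 true_entity1.append([true_label])
--                 pred_entity1.append([pred_label])
--
--         if tmp_true:
--             if count == 1:
--                 true_entity1.append(tmp_true)
--                 pred_entity1.append(tmp_pred)
--
--             elif count == 2:
--                 true_entity2.append(tmp_true)
--                 pred_entity2.append(tmp_pred)
--
--             else:
--                 true_entity3_plus.append(tmp_true)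
--                 pred_entity3_plus.append(tmp_pred)
--
--     true_entities_counts = [true_entity1, true_entity2, true_entity3_plus]
--     pred_entities_counts = [pred_entity1, pred_entity2, pred_entity3_plus]
--
--     return true_entities_counts, pred_entities_counts
-- ===== SOURCE B (Python) =====
-- def entity_size(all_lbls, all_preds):
--     # Pass 1: segment the token stream into an ordered list of (true_seg, pred_seg).
--     segments = []
--     for sentence_true, sentence_pred in zip(all_lbls, all_preds):
--         cur_t, cur_p = [], []
--         for true_label, pred_label in zip(sentence_true, sentence_pred):
--             if true_label.startswith("B-"):
--                 if cur_t:
--                     segments.append((cur_t, cur_p))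
--                 cur_t, cur_p = [true_label], [pred_label]
--             elif true_label.startswith("I-"):
--                 cur_t.append(true_label)
--                 cur_p.append(pred_label)
--             elif true_label.startswith("O"):
--                 if cur_t:
--                     segments.append((cur_t, cur_p))
--                 cur_t, cur_p = [], []
--                 segments.append(([true_label], [pred_label]))
--         if cur_t:
--             segments.append((cur_t, cur_p))
--     # Pass 2: bucket each segment by its length.
--     t1, t2, t3 = [], [], []
--     p1, p2, p3 = [], [], []
--     for ts, ps in segments:
--         if len(ts) == 1:
--             t1.append(ts); p1.append(ps)
--         elif len(ts) == 2:
--             t2.append(ts); p2.append(ps)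
--         else:
--             t3.append(ts); p3.append(ps)
--     return [t1, t2, t3], [p1, p2, p3]
-- ===== Notes on version B (the rewrite author's own statement) =====
-- stated objective: simpler
-- what changed: B separates concerns into two passes: a segmentation pass that builds one ordered list of (true,pred) segments, then a bucketing pass that files each segment by its length, replacing A's single fused loop that re-inlines the count-based six-way bucketing block three times.
import Mathlib
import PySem

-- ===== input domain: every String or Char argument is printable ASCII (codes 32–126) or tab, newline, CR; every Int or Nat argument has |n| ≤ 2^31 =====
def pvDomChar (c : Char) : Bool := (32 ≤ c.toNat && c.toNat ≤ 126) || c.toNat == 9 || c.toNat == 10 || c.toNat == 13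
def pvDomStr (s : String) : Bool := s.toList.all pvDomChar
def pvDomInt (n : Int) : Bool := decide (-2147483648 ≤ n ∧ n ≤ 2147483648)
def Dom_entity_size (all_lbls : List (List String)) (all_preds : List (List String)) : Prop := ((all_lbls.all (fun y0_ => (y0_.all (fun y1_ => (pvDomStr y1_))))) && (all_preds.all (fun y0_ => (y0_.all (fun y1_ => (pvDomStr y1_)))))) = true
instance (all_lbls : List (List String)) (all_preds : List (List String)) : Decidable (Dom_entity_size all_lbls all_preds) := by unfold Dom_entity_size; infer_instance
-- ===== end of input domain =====

-- B replaces A's fused loop (bucketing block inlined three times) by two passes — segment, then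
-- bucket by length — for clarity; same behaviour, same asymptotic cost.

-- ===== PORT A =====
-- A's running state: the six result buckets, the current entity buffers and the running count.
structure ASt where
  t1 : List (List String)
  t2 : List (List String)
  t3 : List (List String)
  p1 : List (List String)
  p2 : List (List String)
  p3 : List (List String)
  tmpT : List String
  tmpP : List String
  count : Int
deriving Repr, DecidableEq

-- the repeated 'if count == 1 … elif count == 2 … else …' bucketing block of A
def pvABucket (s : ASt) : ASt :=
  if s.count = 1 then { s with t1 := s.t1 ++ [s.tmpT], p1 := s.p1 ++ [s.tmpP] }
  else if s.count = 2 then { s with t2 := s.t2 ++ [s.tmpT], p2 := s.p2 ++ [s.tmpP] }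
  else { s with t3 := s.t3 ++ [s.tmpT], p3 := s.p3 ++ [s.tmpP] }

-- the guarded 'if count > 0: <bucketing block>' of the B-/O branches
def pvAFlush (s : ASt) : ASt := if s.count > 0 then pvABucket s else s

-- body of A's inner loop over zip(sentence_true, sentence_pred)
def pvAStep (s : ASt) (tp : String × String) : ASt :=
  if PySem.Str.startswith tp.1 "B-" then
    { pvAFlush s with tmpT := [tp.1], tmpP := [tp.2], count := 1 }
  else if PySem.Str.startswith tp.1 "I-" then
    { s with tmpT := s.tmpT ++ [tp.1], tmpP := s.tmpP ++ [tp.2], count := s.count + 1 }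
  else if PySem.Str.startswith tp.1 "O" then
    { pvAFlush s with tmpT := [], tmpP := [], count := 0,
                      t1 := (pvAFlush s).t1 ++ [[tp.1]], p1 := (pvAFlush s).p1 ++ [[tp.2]] }
  else s

-- the trailing 'if tmp_true: <bucketing block>' of A's outer loop
def pvAFlushEnd (r : ASt) : ASt := if r.tmpT ≠ [] then pvABucket r else r

-- body of A's outer loop over zip(all_lbls, all_preds)
def pvASent (s : ASt) (sent : List String × List String) : ASt :=
  pvAFlushEnd ((sent.1.zip sent.2).foldl pvAStep { s with tmpT := [], tmpP := [], count := 0 })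

def entity_size (all_lbls : List (List String)) (all_preds : List (List String)) : List (List (List String)) × List (List (List String)) :=
  let s := (all_lbls.zip all_preds).foldl pvASent ⟨[], [], [], [], [], [], [], [], 0⟩
  ([s.t1, s.t2, s.t3], [s.p1, s.p2, s.p3])

-- ===== PORT B =====
-- B pass 1: segmentation step over one token pair; state = (segments so far, current buffers)
def pvBSegStep (st : List (List String × List String) × List String × List String) (tp : String × String) : List (List String × List String) × List String × List String :=
  if PySem.Str.startswith tp.1 "B-" then
    (st.1 ++ (if st.2.1 ≠ [] then [(st.2.1, st.2.2)] else []), [tp.1], [tp.2])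
  else if PySem.Str.startswith tp.1 "I-" then
    (st.1, st.2.1 ++ [tp.1], st.2.2 ++ [tp.2])
  else if PySem.Str.startswith tp.1 "O" then
    ((if st.2.1 ≠ [] then st.1 ++ [(st.2.1, st.2.2)] else st.1) ++ [([tp.1], [tp.2])], [], [])
  else st

-- B pass 1: flush a trailing segment at sentence end
def pvBFlush (r : List (List String × List String) × List String × List String) : List (List String × List String) :=
  if r.2.1 ≠ [] then r.1 ++ [(r.2.1, r.2.2)] else r.1

-- B pass 1: one sentence — fold the tokens, then flush any trailing segment
def pvBSent (segs : List (List String × List String)) (sent : List String × List String) : List (List String × List String) :=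
  pvBFlush ((sent.1.zip sent.2).foldl pvBSegStep (segs, [], []))

-- B pass 2: the six buckets, filled by segment length
structure Buck where
  t1 : List (List String)
  t2 : List (List String)
  t3 : List (List String)
  p1 : List (List String)
  p2 : List (List String)
  p3 : List (List String)
deriving Repr, DecidableEq

def pvBBucketStep (b : Buck) (seg : List String × List String) : Buck :=
  if seg.1.length = 1 then { b with t1 := b.t1 ++ [seg.1], p1 := b.p1 ++ [seg.2] }
  else if seg.1.length = 2 then { b with t2 := b.t2 ++ [seg.1], p2 := b.p2 ++ [seg.2] }
  else { b with t3 := b.t3 ++ [seg.1], p3 := b.p3 ++ [seg.2] }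

def entity_size_alt (all_lbls : List (List String)) (all_preds : List (List String)) : List (List (List String)) × List (List (List String)) :=
  let segs := (all_lbls.zip all_preds).foldl pvBSent []
  let b := segs.foldl pvBBucketStep ⟨[], [], [], [], [], []⟩
  ([b.t1, b.t2, b.t3], [b.p1, b.p2, b.p3])

-- ===== PRECONDITION & SPEC =====
def Spec_entity_size (all_lbls : List (List String)) (all_preds : List (List String)) (out : List (List (List String)) × List (List (List String))) : Prop := out = entity_size_alt all_lbls all_preds
instance (all_lbls : List (List String)) (all_preds : List (List String)) (out : List (List (List String)) × List (List (List String))) : Decidable (Spec_entity_size all_lbls all_preds out) := by unfold Spec_entity_size; infer_instance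

-- ===== CLAIM (what is proved, stated in full; the proofs are below) =====
def Claim_equal_entity_size : Prop := ∀ (all_lbls : List (List String)) (all_preds : List (List String)), Dom_entity_size all_lbls all_preds → Spec_entity_size all_lbls all_preds (entity_size all_lbls all_preds)

-- ===== LEMMAS AND PROOFS =====
-- the bucket fields of an A-state
def pvBk (s : ASt) : Buck := ⟨s.t1, s.t2, s.t3, s.p1, s.p2, s.p3⟩

-- A's bucketing block = B's length-based bucketing, given the count invariant
theorem pvABucket_comm (s : ASt) (h : s.count = (s.tmpT.length : Int)) :
    pvBk (pvABucket s) = pvBBucketStep (pvBk s) (s.tmpT, s.tmpP) := by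
  rcases s with ⟨t1, t2, t3, p1, p2, p3, tmpT, tmpP, count⟩
  simp only at h
  subst h
  unfold pvABucket pvBBucketStep pvBk
  dsimp only
  split_ifs <;> first | rfl | omega

theorem pvAFlush_comm (s : ASt) (h : s.count = (s.tmpT.length : Int)) :
    pvBk (pvAFlush s) = (if s.tmpT ≠ [] then [(s.tmpT, s.tmpP)] else []).foldl pvBBucketStep (pvBk s) := by
  unfold pvAFlush
  by_cases hne : s.tmpT = []
  · have hz : ¬ s.count > 0 := by rw [h]; simp [hne]
    simp [hne, hz]
  · have hpos : s.count > 0 := by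
      rw [h]; exact_mod_cast List.length_pos_iff.mpr hne
    simp [hne, hpos, pvABucket_comm s h]

-- pvBSegStep only appends to its segment accumulator
theorem pvBSegStep_prefix (segs : List (List String × List String)) (cT cP : List String) (tp : String × String) :
    pvBSegStep (segs, cT, cP) tp
      = (segs ++ (pvBSegStep ([], cT, cP) tp).1,
         (pvBSegStep ([], cT, cP) tp).2.1, (pvBSegStep ([], cT, cP) tp).2.2) := by
  unfold pvBSegStep; split_ifs <;> simp

theorem pvBSegFold_prefix (toks : List (String × String)) (segs : List (List String × List String)) (cT cP : List String) :
    toks.foldl pvBSegStep (segs, cT, cP)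
      = (segs ++ (toks.foldl pvBSegStep ([], cT, cP)).1,
         (toks.foldl pvBSegStep ([], cT, cP)).2.1, (toks.foldl pvBSegStep ([], cT, cP)).2.2) := by
  induction toks generalizing segs cT cP with
  | nil => simp
  | cons tp toks ih =>
      simp only [List.foldl_cons]
      rw [pvBSegStep_prefix segs cT cP tp]
      rw [ih, ih (pvBSegStep ([], cT, cP) tp).1]
      simp

-- one A-step tracked through B's segmentation
theorem pvStep_comm (s : ASt) (tp : String × String) (h : s.count = (s.tmpT.length : Int)) :
    (pvAStep s tp).count = ((pvAStep s tp).tmpT.length : Int) ∧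
    (pvAStep s tp).tmpT = (pvBSegStep ([], s.tmpT, s.tmpP) tp).2.1 ∧
    (pvAStep s tp).tmpP = (pvBSegStep ([], s.tmpT, s.tmpP) tp).2.2 ∧
    pvBk (pvAStep s tp) = (pvBSegStep ([], s.tmpT, s.tmpP) tp).1.foldl pvBBucketStep (pvBk s) := by
  unfold pvAStep pvBSegStep
  by_cases hB : PySem.Str.startswith tp.1 "B-" = true
  · simp only [if_pos hB]
    refine ⟨by simp, by trivial, by trivial, ?_⟩
    show pvBk (pvAFlush s) = List.foldl pvBBucketStep (pvBk s)
      ([] ++ (if s.tmpT ≠ [] then [(s.tmpT, s.tmpP)] else []))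
    rw [List.nil_append, pvAFlush_comm s h]
  · simp only [if_neg hB]
    by_cases hI : PySem.Str.startswith tp.1 "I-" = true
    · simp only [if_pos hI]
      refine ⟨?_, by trivial, by trivial, by trivial⟩
      show s.count + 1 = ((s.tmpT ++ [tp.1]).length : Int)
      rw [h]; simp
    · simp only [if_neg hI]
      by_cases hO : PySem.Str.startswith tp.1 "O" = true
      · simp only [if_pos hO]
        refine ⟨by simp, by trivial, by trivial, ?_⟩
        show pvBk _ = List.foldl pvBBucketStep (pvBk s)
          ((if s.tmpT ≠ [] then [] ++ [(s.tmpT, s.tmpP)] else []) ++ [([tp.1], [tp.2])])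
        rw [List.foldl_append]
        have hfl : (if s.tmpT ≠ [] then ([] : List (List String × List String)) ++ [(s.tmpT, s.tmpP)] else [])
            = (if s.tmpT ≠ [] then [(s.tmpT, s.tmpP)] else []) := by split_ifs <;> rfl
        rw [hfl, ← pvAFlush_comm s h]
        show pvBk _ = pvBBucketStep (pvBk (pvAFlush s)) ([tp.1], [tp.2])
        simp [pvBBucketStep, pvBk]
      · simp only [if_neg hO]
        exact ⟨h, by trivial, by trivial, by trivial⟩

-- the inner loops agree over a whole token list
theorem pvInner_comm (toks : List (String × String)) (s : ASt) (h : s.count = (s.tmpT.length : Int)) :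
    (toks.foldl pvAStep s).count = (((toks.foldl pvAStep s).tmpT.length : Int)) ∧
    (toks.foldl pvAStep s).tmpT = (toks.foldl pvBSegStep ([], s.tmpT, s.tmpP)).2.1 ∧
    (toks.foldl pvAStep s).tmpP = (toks.foldl pvBSegStep ([], s.tmpT, s.tmpP)).2.2 ∧
    pvBk (toks.foldl pvAStep s) = (toks.foldl pvBSegStep ([], s.tmpT, s.tmpP)).1.foldl pvBBucketStep (pvBk s) := by
  induction toks generalizing s with
  | nil => exact ⟨h, rfl, rfl, by simp⟩
  | cons tp toks ih =>
      rcases pvStep_comm s tp h with ⟨h1, h2, h3, h4⟩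
      rcases ih (pvAStep s tp) h1 with ⟨g1, g2, g3, g4⟩
      simp only [List.foldl_cons]
      rw [show toks.foldl pvBSegStep (pvBSegStep ([], s.tmpT, s.tmpP) tp)
            = toks.foldl pvBSegStep ((pvBSegStep ([], s.tmpT, s.tmpP) tp).1,
                (pvBSegStep ([], s.tmpT, s.tmpP) tp).2.1, (pvBSegStep ([], s.tmpT, s.tmpP) tp).2.2) from rfl]
      rw [pvBSegFold_prefix toks (pvBSegStep ([], s.tmpT, s.tmpP) tp).1]
      refine ⟨g1, ?_, ?_, ?_⟩
      · rw [g2, ← h2, ← h3]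
      · rw [g3, ← h2, ← h3]
      · rw [g4, ← h2, ← h3]
        simp only [List.foldl_append, ← h4]

-- one sentence: A's state update equals bucketing B's segments for that sentence
theorem pvSent_comm (s : ASt) (sent : List String × List String) :
    pvBk (pvASent s sent) = (pvBSent [] sent).foldl pvBBucketStep (pvBk s) := by
  unfold pvASent pvBSent pvAFlushEnd pvBFlush
  have h0 : (({ s with tmpT := [], tmpP := [], count := 0 } : ASt)).count
      = ((({ s with tmpT := [], tmpP := [], count := 0 } : ASt)).tmpT.length : Int) := by simp
  rcases pvInner_comm (sent.1.zip sent.2) { s with tmpT := [], tmpP := [], count := 0 } h0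
    with ⟨h1, h2, h3, h4⟩
  have hbk0 : pvBk ({ s with tmpT := [], tmpP := [], count := 0 } : ASt) = pvBk s := rfl
  rw [hbk0] at h4
  set r := (sent.1.zip sent.2).foldl pvAStep ({ s with tmpT := [], tmpP := [], count := 0 } : ASt) with hr
  set q := (sent.1.zip sent.2).foldl pvBSegStep (([] : List (List String × List String)), ([] : List String), ([] : List String)) with hq
  by_cases hne : r.tmpT = []
  · rw [if_neg (by simp [hne]), if_neg (by rw [← h2]; simp [hne])]
    exact h4
  · rw [if_pos hne, if_pos (by rw [← h2]; exact hne)]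
    rw [List.foldl_append, ← h4, List.foldl_cons, List.foldl_nil]
    rw [pvABucket_comm r h1, ← h2, ← h3]

-- pvBSent only appends to its accumulator
theorem pvBSent_prefix (segs : List (List String × List String)) (sent : List String × List String) :
    pvBSent segs sent = segs ++ pvBSent [] sent := by
  unfold pvBSent pvBFlush
  rw [pvBSegFold_prefix (sent.1.zip sent.2) segs]
  split_ifs <;> simp

theorem pvBSentFold_prefix (sents : List (List String × List String)) (segs : List (List String × List String)) :
    sents.foldl pvBSent segs = segs ++ sents.foldl pvBSent [] := by
  induction sents generalizing segs with
  | nil => simp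
  | cons sent sents ih =>
      simp only [List.foldl_cons]
      rw [pvBSent_prefix segs sent, ih, ih (pvBSent [] sent), List.append_assoc]

-- the outer loops agree
theorem pvOuter_comm (sents : List (List String × List String)) (s : ASt) :
    pvBk (sents.foldl pvASent s) = (sents.foldl pvBSent []).foldl pvBBucketStep (pvBk s) := by
  induction sents generalizing s with
  | nil => simp
  | cons sent sents ih =>
      simp only [List.foldl_cons]
      rw [ih (pvASent s sent), pvBSentFold_prefix sents (pvBSent [] sent)]
      rw [List.foldl_append, pvSent_comm]

-- ===== VERDICT (by name: the statement is the Claim_ definition above) =====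
theorem entity_size_spec : Claim_equal_entity_size := by
  intro all_lbls all_preds _
  unfold Spec_entity_size entity_size entity_size_alt
  have h := pvOuter_comm (all_lbls.zip all_preds) ⟨[], [], [], [], [], [], [], [], 0⟩
  have hinit : pvBk ⟨[], [], [], [], [], [], [], [], 0⟩ = (⟨[], [], [], [], [], []⟩ : Buck) := rfl
  rw [hinit] at h
  show (([((all_lbls.zip all_preds).foldl pvASent ⟨[], [], [], [], [], [], [], [], 0⟩).t1, _, _], [_, _, _]) :
      List (List (List String)) × List (List (List String))) = _
  rw [show ∀ r : ASt, (([r.t1, r.t2, r.t3], [r.p1, r.p2, r.p3]) : List (List (List String)) × List (List (List String)))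
        = ([(pvBk r).t1, (pvBk r).t2, (pvBk r).t3], [(pvBk r).p1, (pvBk r).p2, (pvBk r).p3]) from fun r => rfl]
  rw [h]
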